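-- pv_equiv track=rewrite | github.com/aimin-tang/comp_programming | amazon/items.py | get_item_count_l
-- ===== SOURCE A (Python) =====
-- def get_item_count_l(s):
--     item_count_l = []
--     curr_count = 0
--     for i in range(len(s)):
--         if s[i] == '*':
--             curr_count += 1
--         item_count_l.append(curr_count)
--
--     return item_count_l
-- ===== SOURCE B (Python) =====
-- def get_item_count_l(s):
--     stars = [i for i, c in enumerate(s) if c == '*']
--     out = []
--     for k, p in enumerate(stars):
--         out += [k] * (p - len(out))
--         out.append(k + 1)
--     out += [len(stars)] * (len(s) - len(out))
--     return out
-- ===== Notes on version B (the rewrite author's own statement) =====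
-- stated objective: alternative
-- what changed: Instead of threading a per-character running counter, B first collects the list of asterisk positions, then assembles the answer as constant blocks between consecutive stars (list multiplication) plus a final pad.
import Mathlib
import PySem

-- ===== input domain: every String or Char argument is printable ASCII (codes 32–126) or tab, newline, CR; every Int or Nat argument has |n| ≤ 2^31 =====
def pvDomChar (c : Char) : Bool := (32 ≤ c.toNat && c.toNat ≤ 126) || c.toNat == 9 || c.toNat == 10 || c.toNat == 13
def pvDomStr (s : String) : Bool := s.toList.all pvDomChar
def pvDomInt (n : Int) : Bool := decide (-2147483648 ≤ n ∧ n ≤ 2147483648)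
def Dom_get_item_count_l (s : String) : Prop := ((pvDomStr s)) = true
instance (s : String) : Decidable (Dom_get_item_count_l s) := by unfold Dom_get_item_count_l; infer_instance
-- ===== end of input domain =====

-- B rebuilds the prefix asterisk counts from the list of asterisk positions as constant blocks instead of threading a per-character running counter; objective: alternative.
-- ===== PORT A =====
-- the loop of A: structural recursion over the remaining characters carrying curr_count
def pvGoA : List Char → Int → List Int
  | [], _ => []
  | c :: rest, curr =>
    let curr' := if c = '*' then curr + 1 else curr
    curr' :: pvGoA rest curr'

def get_item_count_l (s : String) : List Int := pvGoA s.toList 0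

-- ===== PORT B =====
-- stars = [i for i, c in enumerate(s) if c == '*']
def pvStars (l : List Char) : List Int :=
  (PySem.List.enumerate l 0).filterMap (fun ic => if ic.2 = '*' then some ic.1 else none)

-- for k, p in enumerate(stars): out += [k] * (p - len(out)); out.append(k + 1)
def pvBlocks (stars : List Int) : List Int :=
  (PySem.List.enumerate stars 0).foldl
    (fun out kp => (out ++ List.replicate (kp.2 - (out.length : Int)).toNat kp.1) ++ [kp.1 + 1]) []

def get_item_count_l_alt (s : String) : List Int :=
  let stars := pvStars s.toList
  let out := pvBlocks stars
  out ++ List.replicate ((s.toList.length : Int) - (out.length : Int)).toNat (stars.length : Int)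

-- ===== PRECONDITION & SPEC =====
def Spec_get_item_count_l (s : String) (out : List Int) : Prop := out = get_item_count_l_alt s
instance (s : String) (out : List Int) : Decidable (Spec_get_item_count_l s out) := by unfold Spec_get_item_count_l; infer_instance

-- ===== CLAIM (what is proved, stated in full; the proofs are below) =====
def Claim_equal_get_item_count_l : Prop := ∀ (s : String), Dom_get_item_count_l s → Spec_get_item_count_l s (get_item_count_l s)

-- ===== LEMMAS AND PROOFS =====
-- the common characterisation: position i holds the number of '*' in the prefix of length i+1
def pvAns (l : List Char) : List Int :=
  (List.range l.length).map (fun i => ((l.take (i + 1)).countP (fun c => c = '*') : Int))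

theorem pvGoA_eq (l : List Char) (curr : Int) :
    pvGoA l curr =
      (List.range l.length).map
        (fun i => curr + ((l.take (i + 1)).countP (fun c => c = '*') : Int)) := by
  induction l generalizing curr with
  | nil => simp [pvGoA]
  | cons c rest ih =>
    simp only [pvGoA, List.length_cons, List.range_succ_eq_map, List.map_cons, List.map_map]
    rw [ih]
    congr 1
    · simp [List.countP_cons]
      split_ifs with h <;> simp
    · apply List.map_congr_left
      intro i _
      simp [List.countP_cons, Function.comp]
      split_ifs with h <;> ring

theorem pvAns_append (l : List Char) (c : Char) :
    pvAns (l ++ [c]) = pvAns l ++ [((l ++ [c]).countP (fun x => x = '*') : Int)] := by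
  unfold pvAns
  rw [List.length_append, List.length_singleton, List.range_succ, List.map_append]
  congr 1
  · apply List.map_congr_left
    intro i hi
    rw [List.mem_range] at hi
    rw [List.take_append_of_le_length (by omega)]
  · simp only [List.map_cons, List.map_nil]
    rw [List.take_of_length_le (by simp)]

theorem pvStars_append_star (l : List Char) :
    pvStars (l ++ ['*']) = pvStars l ++ [(l.length : Int)] := by
  unfold pvStars
  rw [PySem.List.enumerate_append, List.filterMap_append]
  simp [PySem.List.enumerate_cons, PySem.List.enumerate_nil]

theorem pvStars_append_non (l : List Char) (c : Char) (h : ¬ c = '*') :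
    pvStars (l ++ [c]) = pvStars l := by
  unfold pvStars
  rw [PySem.List.enumerate_append, List.filterMap_append]
  simp [PySem.List.enumerate_cons, PySem.List.enumerate_nil, h]

theorem pvStars_length (l : List Char) :
    (pvStars l).length = l.countP (fun x => x = '*') := by
  induction l using List.reverseRecOn with
  | nil => simp [pvStars, PySem.List.enumerate_nil]
  | append_singleton l c ih =>
    by_cases h : c = '*'
    · subst h
      rw [pvStars_append_star]
      simp [List.countP_append, ih]
    · rw [pvStars_append_non l c h]
      simp [List.countP_append, h, ih]

theorem pvBlocks_append (ps : List Int) (p : Int) :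
    pvBlocks (ps ++ [p]) =
      (pvBlocks ps ++ List.replicate (p - ((pvBlocks ps).length : Int)).toNat (ps.length : Int))
        ++ [(ps.length : Int) + 1] := by
  unfold pvBlocks
  rw [PySem.List.enumerate_append, List.foldl_append]
  simp [PySem.List.enumerate_cons, PySem.List.enumerate_nil]

-- main invariant: the blocks plus final padding to length l give exactly pvAns l,
-- and the blocks built so far never exceed the scanned length
theorem pvB_main (l : List Char) :
    (pvBlocks (pvStars l)).length ≤ l.length ∧
      pvBlocks (pvStars l) ++
        List.replicate ((l.length : Int) - ((pvBlocks (pvStars l)).length : Int)).toNat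
          ((pvStars l).length : Int) = pvAns l := by
  induction l using List.reverseRecOn with
  | nil => simp [pvStars, pvBlocks, pvAns, PySem.List.enumerate_nil]
  | append_singleton l c ih =>
    obtain ⟨hlen, hval⟩ := ih
    by_cases h : c = '*'
    · subst h
      rw [pvStars_append_star, pvBlocks_append]
      have hlen2 : ((pvBlocks (pvStars l) ++
          List.replicate ((l.length : Int) - ((pvBlocks (pvStars l)).length : Int)).toNat
            ((pvStars l).length : Int)) ++ [((pvStars l).length : Int) + 1]).length
          = l.length + 1 := by
        simp; omega
      refine ⟨by rw [hlen2]; simp, ?_⟩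
      have hpad : (((l ++ ['*']).length : Int) -
          ((((pvBlocks (pvStars l) ++
            List.replicate ((l.length : Int) - ((pvBlocks (pvStars l)).length : Int)).toNat
              ((pvStars l).length : Int)) ++ [((pvStars l).length : Int) + 1]).length : Nat) : Int)).toNat = 0 := by
        rw [hlen2]; simp
      rw [hpad, List.replicate_zero, List.append_nil, pvAns_append, ← hval]
      congr 1
      simp [pvStars_length, List.countP_append]
    · rw [pvStars_append_non l c h]
      refine ⟨by simp; omega, ?_⟩
      rw [pvAns_append, ← hval]
      have hstep : (((l ++ [c]).length : Int) - (((pvBlocks (pvStars l)).length : Nat) : Int)).toNat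
          = ((l.length : Int) - (((pvBlocks (pvStars l)).length : Nat) : Int)).toNat + 1 := by
        simp; omega
      rw [hstep, List.replicate_succ', ← List.append_assoc]
      congr 1
      simp [pvStars_length, List.countP_append, h]

-- ===== VERDICT (by name: the statement is the Claim_ definition above) =====
theorem get_item_count_l_spec : Claim_equal_get_item_count_l := by
  intro s _
  unfold Spec_get_item_count_l get_item_count_l get_item_count_l_alt
  rw [pvGoA_eq]
  have h := (pvB_main s.toList).2
  unfold pvAns at h
  rw [h]
  simp
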